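-- pv_equiv track=rewrite | github.com/jbkim0526/Problem_Solving | 프로그래머스/Level3/64. 선입선출 스케줄링/sol2.py | solution
-- ===== SOURCE A (Python) =====
-- def solution(n, cores):
--     hour = 0
--     res = []
--     while True:
--         for i,core in enumerate(cores):
--             if hour % core != 0:
--                 continue
--             res.append(core)
--             if len(res) == n:
--                 return i+1
--         hour += 1
-- ===== SOURCE B (Python) =====
-- def solution(n, cores):
--     # jobs 1..len(cores) are all assigned at hour 0, job k to core k
--     if n <= len(cores):
--         return n
--     # otherwise binary-search the critical hour, then assign the remaining jobs by index
--     m = [abs(c) for c in cores]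
--
--     def total(h):
--         # jobs started during hours 0..h (h may be -1: then 0)
--         return sum(h // c + 1 for c in m)
--
--     lo, hi = 0, n * m[0]
--     while lo < hi:
--         mid = (lo + hi) // 2
--         if total(mid) >= n:
--             hi = mid
--         else:
--             lo = mid + 1
--     rem = n - total(lo - 1)
--     for i, c in enumerate(m):
--         if lo % c == 0:
--             rem -= 1
--             if rem == 0:
--                 return i + 1
-- ===== Notes on version B (the rewrite author's own statement) =====
-- stated objective: faster
-- what changed: A simulates every hour, scanning all cores each hour until n jobs are assigned; B answers n directly when n <= len(cores) (all assigned at hour 0) and otherwise binary-searches for the critical hour h (smallest h whose cumulative capacity sum(h//|c|+1) reaches n), then assigns the few remaining jobs in one pass over the cores, so the hour-by-hour simulation disappears.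
import Mathlib
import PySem

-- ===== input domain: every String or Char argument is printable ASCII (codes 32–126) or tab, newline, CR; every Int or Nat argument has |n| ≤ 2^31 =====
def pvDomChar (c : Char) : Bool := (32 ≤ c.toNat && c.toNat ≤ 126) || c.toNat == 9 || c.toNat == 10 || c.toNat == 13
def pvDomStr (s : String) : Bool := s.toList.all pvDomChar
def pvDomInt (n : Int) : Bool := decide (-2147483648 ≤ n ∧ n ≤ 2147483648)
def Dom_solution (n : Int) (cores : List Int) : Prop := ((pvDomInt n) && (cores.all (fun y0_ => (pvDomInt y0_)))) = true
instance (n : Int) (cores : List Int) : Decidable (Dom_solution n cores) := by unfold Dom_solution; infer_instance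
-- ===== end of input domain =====

-- B replaces A's hour-by-hour simulation by a binary search for the critical hour
-- followed by one pass assigning the remaining jobs by index (objective: faster, asymptotic).

-- ===== PORT A =====
-- inner 'for i,core in enumerate(cores)' loop; res is the growing list A appends to,
-- kept in reverse (cons instead of append) and paired with its length rlen (Python's O(1)
-- len(res)): A only ever reads len(res), which both changes preserve
def pvInnerA (n hour : Int) : List (Int × Int) → List Int → Int → Sum Int (List Int × Int)
  | [], res, rlen => .inr (res, rlen)
  | (i, core) :: rest, res, rlen =>
    if PySem.Int.mod hour core ≠ 0 then pvInnerA n hour rest res rlen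
    else
      if rlen + 1 = n then .inl (i + 1)
      else pvInnerA n hour rest (core :: res) (rlen + 1)

-- 'while True' loop; fuel only makes it total (Pre_ guarantees it suffices), 0 = never reached
def pvLoopA (n : Int) (cores : List Int) : Nat → Int → List Int → Int → Int
  | 0, _, _, _ => 0
  | fuel + 1, hour, res, rlen =>
    match pvInnerA n hour (PySem.List.enumerate cores 0) res rlen with
    | .inl ans => ans
    | .inr (res', rlen') => pvLoopA n cores fuel (hour + 1) res' rlen'

def solution (n : Int) (cores : List Int) : Int :=
  pvLoopA n cores ((n * ((cores.headD 1).natAbs : Int)).toNat + 1) 0 [] 0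

-- ===== PORT B =====
-- total(h) = sum(h // c + 1 for c in m)
def pvTotalB (m : List Int) (h : Int) : Int :=
  (m.map (fun c => PySem.Int.floordiv h c + 1)).sum

-- 'while lo < hi' binary search; the interval shrinks each round, so (hi - lo).toNat
-- rounds of fuel only make the loop total and are never exhausted
def pvBsearchGo (n : Int) (m : List Int) : Nat → Int → Int → Int
  | 0, lo, _ => lo
  | fuel + 1, lo, hi =>
    if lo < hi then
      let mid := PySem.Int.floordiv (lo + hi) 2
      if n ≤ pvTotalB m mid then pvBsearchGo n m fuel lo mid
      else pvBsearchGo n m fuel (mid + 1) hi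
    else lo

def pvBsearchB (n : Int) (m : List Int) (lo hi : Int) : Int :=
  pvBsearchGo n m (hi - lo).toNat lo hi

-- 'for i, c in enumerate(m)' assignment pass; 0 = Python's implicit None (never reached under Pre_)
def pvWalkB (h : Int) : List (Int × Int) → Int → Int
  | [], _ => 0
  | (i, c) :: rest, rem =>
    if PySem.Int.mod h c = 0 then
      if rem - 1 = 0 then i + 1 else pvWalkB h rest (rem - 1)
    else pvWalkB h rest rem

def solution_alt (n : Int) (cores : List Int) : Int :=
  if n ≤ (cores.length : Int) then n
  else
    let m := cores.map (fun c => |c|)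
    -- m[0] raises IndexError on empty cores, which Pre_ excludes; headD 0 only makes it total
    let lo := pvBsearchB n m 0 (n * m.headD 0)
    let rem := n - pvTotalB m (lo - 1)
    pvWalkB lo (PySem.List.enumerate m 0) rem

-- ===== PRECONDITION & SPEC =====
-- Pre_ is exactly where A returns: it excludes n < 1 and empty cores (A loops forever)
-- and a core 0 among the first min(n, len) cores, on which A's 'hour % core' raises
-- ZeroDivisionError before the nth job is ever assigned.
def Pre_solution (n : Int) (cores : List Int) : Prop :=
  1 ≤ n ∧ cores ≠ [] ∧ ∀ c ∈ cores.take n.toNat, c ≠ 0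
instance (n : Int) (cores : List Int) : Decidable (Pre_solution n cores) := by
  unfold Pre_solution; infer_instance

def pvWitness_solution : Int × List Int := (4, [2, -3, 1])

def Spec_solution (n : Int) (cores : List Int) (out : Int) : Prop := out = solution_alt n cores
instance (n : Int) (cores : List Int) (out : Int) : Decidable (Spec_solution n cores out) := by
  unfold Spec_solution; infer_instance

-- ===== CLAIM (what is proved, stated in full; the proofs are below) =====
def Claim_equal_solution : Prop := ∀ (n : Int) (cores : List Int), Dom_solution n cores → Pre_solution n cores → Spec_solution n cores (solution n cores)

-- ===== LEMMAS AND PROOFS =====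

-- divisibility by a core is unchanged by abs
theorem pvModAbs (h c : Int) : (PySem.Int.mod h |c| = 0) = (PySem.Int.mod h c = 0) := by
  simp only [PySem.Int.mod_eq_zero_iff_dvd, abs_dvd]

-- pointwise floordiv facts (positive divisor)
theorem pvFdNonneg (h c : Int) (hc : 0 < c) (hh : 0 ≤ h) : 0 ≤ PySem.Int.floordiv h c := by
  rw [PySem.Int.le_floordiv_iff_mul_le hc]; omega

theorem pvFdNegOne (c : Int) (hc : 0 < c) : PySem.Int.floordiv (-1) c = -1 := by
  rw [PySem.Int.floordiv_eq_iff_of_pos hc]; constructor <;> omega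

theorem pvFdMono (h h' c : Int) (hc : 0 < c) (hhh : h ≤ h') :
    PySem.Int.floordiv h c ≤ PySem.Int.floordiv h' c := by
  rw [PySem.Int.le_floordiv_iff_mul_le hc]
  have h1 := PySem.Int.floordiv_mul_add_mod h c
  have h2 := PySem.Int.mod_nonneg h hc
  omega

theorem pvFdSucc (h c : Int) (hc : 0 < c) (hh : 0 ≤ h) :
    PySem.Int.floordiv h c + 1
      = (PySem.Int.floordiv (h - 1) c + 1) + (if PySem.Int.mod h c = 0 then 1 else 0) := by
  have h1 := PySem.Int.floordiv_mul_add_mod h c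
  have h2 := PySem.Int.mod_nonneg h hc
  have h3 := PySem.Int.mod_lt h hc
  by_cases hz : PySem.Int.mod h c = 0
  · have : PySem.Int.floordiv (h - 1) c = PySem.Int.floordiv h c - 1 := by
      rw [PySem.Int.floordiv_eq_iff_of_pos hc]
      constructor <;> nlinarith [h1, hz]
    simp [hz, this]
  · have hz1 : 1 ≤ PySem.Int.mod h c := by omega
    have : PySem.Int.floordiv (h - 1) c = PySem.Int.floordiv h c := by
      rw [PySem.Int.floordiv_eq_iff_of_pos hc]
      constructor <;> nlinarith [h1]
    simp [hz, this]

theorem pvFdMulCancel (k c : Int) (hc : 0 < c) : PySem.Int.floordiv (k * c) c = k := by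
  rw [PySem.Int.floordiv_eq_iff_of_pos hc]; constructor <;> nlinarith

-- total-level facts (all entries positive)
theorem pvTotalNegOne (m : List Int) (hm : ∀ c ∈ m, 0 < c) : pvTotalB m (-1) = 0 := by
  induction m with
  | nil => simp [pvTotalB]
  | cons c rest ih =>
    have hc := hm c (by simp)
    simp only [pvTotalB, List.map_cons, List.sum_cons, pvFdNegOne c hc] at *
    rw [ih (fun x hx => hm x (by simp [hx]))]; ring

theorem pvTotalNonneg (m : List Int) (h : Int) (hm : ∀ c ∈ m, 0 < c) (hh : 0 ≤ h) :
    0 ≤ pvTotalB m h := by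
  induction m with
  | nil => simp [pvTotalB]
  | cons c rest ih =>
    have hc := hm c (by simp)
    have h1 := pvFdNonneg h c hc hh
    have h2 := ih (fun x hx => hm x (by simp [hx]))
    simp only [pvTotalB, List.map_cons, List.sum_cons] at *
    omega

theorem pvTotalMono (m : List Int) (h h' : Int) (hm : ∀ c ∈ m, 0 < c) (hhh : h ≤ h') :
    pvTotalB m h ≤ pvTotalB m h' := by
  induction m with
  | nil => simp [pvTotalB]
  | cons c rest ih =>
    have hc := hm c (by simp)
    have h1 := pvFdMono h h' c hc hhh
    have h2 := ih (fun x hx => hm x (by simp [hx]))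
    simp only [pvTotalB, List.map_cons, List.sum_cons] at *
    omega

theorem pvTotalSucc (m : List Int) (h : Int) (hm : ∀ c ∈ m, 0 < c) (hh : 0 ≤ h) :
    pvTotalB m h
      = pvTotalB m (h - 1) + (m.countP (fun c => decide (PySem.Int.mod h c = 0)) : Int) := by
  induction m with
  | nil => simp [pvTotalB]
  | cons c rest ih =>
    have hc := hm c (by simp)
    have h1 := pvFdSucc h c hc hh
    have h2 := ih (fun x hx => hm x (by simp [hx]))
    simp only [pvTotalB, List.map_cons, List.sum_cons] at h2 ⊢
    rw [List.countP_cons]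
    by_cases hz : PySem.Int.mod h c = 0
    · rw [if_pos hz] at h1
      simp only [hz, decide_true, if_pos]
      push_cast
      omega
    · rw [if_neg hz] at h1
      simp only [hz, decide_false]
      push_cast
      omega

theorem pvTotalHeadLB (c : Int) (rest : List Int) (h : Int)
    (hm : ∀ x ∈ c :: rest, 0 < x) (hh : 0 ≤ h) :
    PySem.Int.floordiv h c + 1 ≤ pvTotalB (c :: rest) h := by
  have h2 := pvTotalNonneg rest h (fun x hx => hm x (by simp [hx])) hh
  simp only [pvTotalB, List.map_cons, List.sum_cons] at *
  omega

-- countP transfers through abs and enumerate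
theorem pvCntAbs (xs : List Int) (h : Int) :
    (xs.map (fun c => |c|)).countP (fun c => decide (PySem.Int.mod h c = 0))
      = xs.countP (fun c => decide (PySem.Int.mod h c = 0)) := by
  rw [List.countP_map]
  apply List.countP_congr
  intro c _
  simp [Function.comp, pvModAbs h c]

theorem pvCntEnum (xs : List Int) (s h : Int) :
    (PySem.List.enumerate xs s).countP (fun p => decide (PySem.Int.mod h p.2 = 0))
      = xs.countP (fun c => decide (PySem.Int.mod h c = 0)) := by
  induction xs generalizing s with
  | nil => simp [PySem.List.enumerate_nil]
  | cons c rest ih => simp [PySem.List.enumerate_cons, List.countP_cons, ih]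

-- the inner for-loop, non-returning case
theorem pvInnerInr (n h : Int) (l : List (Int × Int)) (res : List Int) (rlen : Int)
    (hlt : rlen + (l.countP (fun p => decide (PySem.Int.mod h p.2 = 0)) : Int) < n) :
    pvInnerA n h l res rlen
      = .inr (((l.filter (fun p => decide (PySem.Int.mod h p.2 = 0))).map (·.2)).reverse ++ res,
          rlen + (l.countP (fun p => decide (PySem.Int.mod h p.2 = 0)) : Int)) := by
  induction l generalizing res rlen with
  | nil => simp [pvInnerA]
  | cons p rest ih =>
    obtain ⟨i, c⟩ := p
    simp only [List.countP_cons] at hlt ⊢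
    by_cases hz : PySem.Int.mod h c = 0
    · have hcnt : 0 ≤ (rest.countP (fun p => decide (PySem.Int.mod h p.2 = 0)) : Int) := by positivity
      have hne : ¬ (rlen + 1 = n) := by
        simp [hz] at hlt
        omega
      simp only [pvInnerA, hz, ne_eq, not_true_eq_false, if_false, if_neg hne]
      rw [ih (c :: res) (rlen + 1) (by
        simp [hz] at hlt
        omega)]
      simp [hz]
      omega
    · simp only [pvInnerA, hz, ne_eq, not_false_eq_true, if_true]
      rw [ih res rlen (by simp [hz] at hlt; omega)]
      simp [hz]

-- the inner for-loop, returning case, equals B's assignment pass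
theorem pvInnerInl (n h : Int) (l : List (Int × Int)) (res : List Int) (rlen : Int)
    (hge : n ≤ rlen + (l.countP (fun p => decide (PySem.Int.mod h p.2 = 0)) : Int))
    (hlt : rlen < n) :
    pvInnerA n h l res rlen = .inl (pvWalkB h l (n - rlen)) := by
  induction l generalizing res rlen with
  | nil => simp at hge; omega
  | cons p rest ih =>
    obtain ⟨i, c⟩ := p
    simp only [List.countP_cons] at hge
    by_cases hz : PySem.Int.mod h c = 0
    · by_cases hn : rlen + 1 = n
      · have hrem : n - rlen - 1 = 0 := by omega
        simp [pvInnerA, pvWalkB, hz, hn, hrem]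
      · have hrem : ¬ (n - rlen - 1 = 0) := by omega
        simp only [pvInnerA, pvWalkB, hz, ne_eq, not_true_eq_false, if_false, if_neg hn,
          if_true, if_neg hrem]
        rw [ih (c :: res) (rlen + 1) (by simp [hz] at hge; omega) (by omega)]
        ring_nf
    · simp only [pvInnerA, pvWalkB, hz, ne_eq, not_false_eq_true, if_true, if_false]
      exact ih res rlen (by simp [hz] at hge; omega) hlt

-- B's assignment pass does not care about the sign of the cores
theorem pvWalkAbs (h : Int) (xs : List Int) (s rem : Int) :
    pvWalkB h (PySem.List.enumerate (xs.map (fun c => |c|)) s) rem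
      = pvWalkB h (PySem.List.enumerate xs s) rem := by
  induction xs generalizing s rem with
  | nil => simp [PySem.List.enumerate_nil]
  | cons c rest ih =>
    simp only [List.map_cons, PySem.List.enumerate_cons, pvWalkB, pvModAbs h c]
    by_cases hz : PySem.Int.mod h c = 0 <;> simp [hz, ih]

theorem pvMidBounds (lo hi : Int) (h : lo < hi) :
    lo ≤ PySem.Int.floordiv (lo + hi) 2 ∧ PySem.Int.floordiv (lo + hi) 2 < hi := by
  have h1 := PySem.Int.floordiv_mul_add_mod (lo + hi) 2
  have h2 := PySem.Int.mod_nonneg (lo + hi) (b := 2) (by norm_num)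
  have h3 := PySem.Int.mod_lt (lo + hi) (b := 2) (by norm_num)
  omega

-- the binary-search loop finds the critical hour (fuel covering the interval suffices)
theorem pvBsearchGoSpec (n : Int) (m : List Int) :
    ∀ (fuel : Nat) (lo hi : Int), (hi - lo).toNat ≤ fuel → 0 ≤ lo → lo ≤ hi →
    pvTotalB m (lo - 1) < n → n ≤ pvTotalB m hi →
    0 ≤ pvBsearchGo n m fuel lo hi ∧ pvBsearchGo n m fuel lo hi ≤ hi ∧
      n ≤ pvTotalB m (pvBsearchGo n m fuel lo hi) ∧
      pvTotalB m (pvBsearchGo n m fuel lo hi - 1) < n := by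
  intro fuel
  induction fuel with
  | zero =>
    intro lo hi hk hlo hle hlow hhigh
    have heq : lo = hi := by omega
    subst heq
    exact ⟨hlo, le_refl _, hhigh, hlow⟩
  | succ fuel ih =>
    intro lo hi hk hlo hle hlow hhigh
    by_cases h : lo < hi
    · have hmid := pvMidBounds lo hi h
      set mid := PySem.Int.floordiv (lo + hi) 2 with hmiddef
      by_cases hc : n ≤ pvTotalB m mid
      · simp only [pvBsearchGo, if_pos h, ← hmiddef, if_pos hc]
        obtain ⟨a1, a2, a3, a4⟩ :=
          ih lo mid (by omega) hlo (by omega) hlow hc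
        exact ⟨a1, by omega, a3, a4⟩
      · simp only [pvBsearchGo, if_pos h, ← hmiddef, if_neg hc]
        exact ih (mid + 1) hi (by omega) (by omega) (by omega)
          (by simpa using (show pvTotalB m mid < n by omega)) hhigh
    · have heq : lo = hi := by omega
      simp only [pvBsearchGo, if_neg h]
      subst heq
      exact ⟨hlo, le_refl _, hhigh, hlow⟩

theorem pvBsearchSpec (n : Int) (m : List Int)
    (lo hi : Int) (hlo : 0 ≤ lo) (hle : lo ≤ hi)
    (hlow : pvTotalB m (lo - 1) < n) (hhigh : n ≤ pvTotalB m hi) :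
    0 ≤ pvBsearchB n m lo hi ∧ pvBsearchB n m lo hi ≤ hi ∧
      n ≤ pvTotalB m (pvBsearchB n m lo hi) ∧ pvTotalB m (pvBsearchB n m lo hi - 1) < n := by
  unfold pvBsearchB
  exact pvBsearchGoSpec n m (hi - lo).toNat lo hi (le_refl _) hlo hle hlow hhigh

-- the while-True loop of A returns B's assignment pass at the critical hour
theorem pvLoopAEq (n : Int) (cores : List Int) (h₀ : Int)
    (hm : ∀ c ∈ cores.map (fun c => |c|), 0 < c)
    (h0 : 0 ≤ h₀)
    (hch : n ≤ pvTotalB (cores.map (fun c => |c|)) h₀)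
    (hcl : pvTotalB (cores.map (fun c => |c|)) (h₀ - 1) < n) :
    ∀ (fuel : Nat) (h : Int) (res : List Int) (rlen : Int), 0 ≤ h → h ≤ h₀ →
      rlen = pvTotalB (cores.map (fun c => |c|)) (h - 1) →
      h₀ < h + fuel →
      pvLoopA n cores fuel h res rlen
        = pvWalkB h₀ (PySem.List.enumerate cores 0)
            (n - pvTotalB (cores.map (fun c => |c|)) (h₀ - 1)) := by
  intro fuel
  induction fuel with
  | zero => intro h res rlen hh hhle hlen hfuel; omega
  | succ fuel ih =>
    intro h res rlen hh hhle hlen hfuel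
    set m := cores.map (fun c => |c|) with hmdef
    have hcnt : (m.countP (fun c => decide (PySem.Int.mod h c = 0)) : Int)
        = pvTotalB m h - pvTotalB m (h - 1) := by
      have := pvTotalSucc m h hm hh; omega
    have hcntE : ((PySem.List.enumerate cores 0).countP
        (fun p => decide (PySem.Int.mod h p.2 = 0)) : Int)
        = pvTotalB m h - pvTotalB m (h - 1) := by
      rw [pvCntEnum cores 0 h, ← pvCntAbs cores h, ← hmdef, hcnt]
    have hrlt : rlen < n := by
      have := pvTotalMono m (h - 1) (h₀ - 1) hm (by omega); omega
    by_cases hcase : n ≤ pvTotalB m h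
    · have hhe : h = h₀ := by
        by_contra hne
        have : h ≤ h₀ - 1 := by omega
        have := pvTotalMono m h (h₀ - 1) hm this
        omega
      subst hhe
      simp only [pvLoopA]
      rw [pvInnerInl n h (PySem.List.enumerate cores 0) res rlen (by omega) hrlt]
      rw [hlen]
    · simp only [pvLoopA]
      rw [pvInnerInr n h (PySem.List.enumerate cores 0) res rlen (by omega)]
      have hne : h ≠ h₀ := by intro he; subst he; omega
      have hlen' : rlen + ((PySem.List.enumerate cores 0).countP
          (fun p => decide (PySem.Int.mod h p.2 = 0)) : Int)
          = pvTotalB m (h + 1 - 1) := by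
        simp only [add_sub_cancel_right]
        omega
      exact ih (h + 1) _ _ (by omega) (by omega) hlen' (by omega)

-- hour 0: every core divides 0, so the first scan assigns one job per core, in index order
theorem pvModZeroLeft (c : Int) : PySem.Int.mod 0 c = 0 :=
  (PySem.Int.mod_eq_zero_iff_dvd 0 c).mpr (dvd_zero c)

theorem pvCntHourZero (xs : List Int) (s : Int) :
    (PySem.List.enumerate xs s).countP (fun p => decide (PySem.Int.mod 0 p.2 = 0))
      = xs.length := by
  rw [pvCntEnum xs s 0]
  exact List.countP_eq_length.mpr (fun c _ => by simp [pvModZeroLeft c])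

theorem pvWalkZero (xs : List Int) :
    ∀ (s rem : Int), 1 ≤ rem → rem ≤ (xs.length : Int) →
    pvWalkB 0 (PySem.List.enumerate xs s) rem = s + rem := by
  induction xs with
  | nil => intro s rem h1 h2; simp at h2; omega
  | cons c rest ih =>
    intro s rem h1 h2
    have hc : PySem.Int.mod 0 c = 0 := pvModZeroLeft c
    simp only [PySem.List.enumerate_cons, pvWalkB]
    rw [if_pos hc]
    by_cases hr : rem - 1 = 0
    · rw [if_pos hr]; omega
    · rw [if_neg hr]
      rw [ih (s + 1) (rem - 1) (by omega)
        (by simp only [List.length_cons] at h2; push_cast at h2 ⊢; omega)]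
      ring

-- ===== VERDICT (by name: the statement is the Claim_ definition above) =====
theorem solution_spec : Claim_equal_solution := by
  intro n cores _ hpre
  obtain ⟨hn, hne, hnz⟩ := hpre
  obtain ⟨c0, rest, rfl⟩ : ∃ c0 rest, cores = c0 :: rest := by
    cases cores with
    | nil => exact absurd rfl hne
    | cons a l => exact ⟨a, l, rfl⟩
  unfold Spec_solution
  by_cases hsmall : n ≤ (((c0 :: rest).length : Nat) : Int)
  · -- n jobs all start at hour 0: both sides return n
    have hBn : solution_alt n (c0 :: rest) = n := by
      unfold solution_alt; rw [if_pos hsmall]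
    unfold solution
    simp only [pvLoopA]
    rw [pvInnerInl n 0 (PySem.List.enumerate (c0 :: rest) 0) [] 0
      (by rw [pvCntHourZero]; omega) (by omega)]
    rw [pvWalkZero (c0 :: rest) 0 (n - 0) (by omega) (by omega)]
    rw [hBn]
    ring
  · -- n > len(cores): every core is within the first n, so all cores are nonzero
    have hnz' : ∀ c ∈ c0 :: rest, c ≠ 0 := by
      rwa [List.take_of_length_le (by omega : (c0 :: rest).length ≤ n.toNat)] at hnz
    set m := (c0 :: rest).map (fun c => |c|) with hmdef
    have hm : ∀ c ∈ m, 0 < c := by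
      intro c hc
      rw [hmdef, List.mem_map] at hc
      obtain ⟨x, hx, rfl⟩ := hc
      have := hnz' x hx
      exact abs_pos.mpr this
    have hc0 : 0 < |c0| := abs_pos.mpr (hnz' c0 (by simp))
    have hhead : m.headD 0 = |c0| := by simp [hmdef]
    have hhi0 : 0 ≤ n * |c0| := by positivity
    have hhiB : n ≤ pvTotalB m (n * |c0|) := by
      have h1 := pvTotalHeadLB |c0| (rest.map (fun c => |c|)) (n * |c0|)
        (by rw [hmdef] at hm; simpa using hm) hhi0
      rw [pvFdMulCancel n |c0| hc0] at h1
      rw [hmdef]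
      simp only [List.map_cons]
      omega
    have hneg : pvTotalB m (-1) = 0 := pvTotalNegOne m hm
    have hbs := pvBsearchSpec n m 0 (n * |c0|) (le_refl 0) hhi0
      (by rw [show (0 : Int) - 1 = -1 from by ring, hneg]; omega) hhiB
    set L := pvBsearchB n m 0 (n * |c0|) with hLdef
    obtain ⟨hL0, hLhi, hLge, hLlt⟩ := hbs
    have halt : solution_alt n (c0 :: rest)
        = pvWalkB (pvBsearchB n m 0 (n * m.headD 0)) (PySem.List.enumerate m 0)
            (n - pvTotalB m (pvBsearchB n m 0 (n * m.headD 0) - 1)) := by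
      unfold solution_alt
      rw [if_neg hsmall]
    rw [hhead, ← hLdef] at halt
    rw [halt]
    unfold solution
    have habs : |c0| = ((c0.natAbs : Int)) := (Int.natCast_natAbs c0).symm
    have hfuel : L < 0 + ((n * ((c0.natAbs : Int))).toNat + 1 : Nat) := by
      rw [← habs]
      have : (0 : Int) ≤ n * |c0| := hhi0
      omega
    rw [show ((c0 :: rest).headD 1) = c0 by rfl]
    rw [pvLoopAEq n (c0 :: rest) L hm hL0 hLge hLlt _ 0 [] 0 (le_refl 0) hL0
      (by rw [show (0 : Int) - 1 = -1 from by ring, hneg]) hfuel]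
    rw [pvWalkAbs L (c0 :: rest) 0 (n - pvTotalB m (L - 1))]
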